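-- pv_equiv track=rewrite | github.com/Jiyuan-Yang/paper_lookup | core/utils/condition_parser.py | get_level_dict
-- ===== SOURCE A (Python) =====
-- def get_level_dict(condition: str) -> dict:
--     current_level = 0
--     level_dict = {}
--     for idx, ch in enumerate(condition):
--         if ch == '(':
--             current_level += 1
--         elif ch == ')':
--             current_level -= 1
--         elif ch == '&' or ch == '|':
--             current_level_dict = level_dict.get(current_level, None)
--             if not current_level_dict:
--                 level_dict[current_level] = {'&': [], '|': []}
--                 current_level_dict = level_dict[current_level]
--             if ch == '&':
--                 current_level_dict['&'].append(idx)
--             else: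
--                 current_level_dict['|'].append(idx)
--     return level_dict
-- ===== SOURCE B (Python) =====
-- def get_level_dict(condition: str) -> dict:
--     # phase 1: nesting level BEFORE each position, as a running balance table
--     levels = []
--     bal = 0
--     for ch in condition:
--         levels.append(bal)
--         bal += (ch == '(') - (ch == ')')
--     # phase 2: keep only operator positions, tagged with their precomputed level
--     ops = [(lev, ch, idx)
--            for (idx, ch), lev in zip(enumerate(condition), levels)
--            if ch == '&' or ch == '|']
--     # phase 3: group the operator indices by level
--     level_dict = {}
--     for lev, ch, idx in ops:
--         level_dict.setdefault(lev, {'&': [], '|': []})[ch].append(idx)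
--     return level_dict
-- ===== Notes on version B (the rewrite author's own statement) =====
-- stated objective: alternative
-- what changed: A's single fused scan (running level and dict updated together per character) is split into three phases: a per-position nesting-level table built by a running balance, a filter producing only the operator positions tagged with their precomputed level, and a separate grouping pass over that filtered list using dict.setdefault.
import Mathlib
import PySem

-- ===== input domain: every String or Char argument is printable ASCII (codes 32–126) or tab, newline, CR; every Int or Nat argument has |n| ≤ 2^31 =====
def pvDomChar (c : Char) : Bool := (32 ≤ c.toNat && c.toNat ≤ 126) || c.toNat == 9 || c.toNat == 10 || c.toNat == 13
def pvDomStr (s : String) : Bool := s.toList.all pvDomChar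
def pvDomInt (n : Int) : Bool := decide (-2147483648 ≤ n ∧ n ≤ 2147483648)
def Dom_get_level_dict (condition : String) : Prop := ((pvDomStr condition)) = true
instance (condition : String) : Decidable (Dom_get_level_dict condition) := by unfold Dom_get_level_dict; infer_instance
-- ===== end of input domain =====

-- B replaces A's single fused scan by a three-phase pipeline (precomputed per-position
-- nesting-level table, filter to operator positions, group by level); objective: alternative
-- decomposition, same cost.


-- ===== PORT A =====
-- A's loop body; state = (current_level, level_dict).
-- Python's truthiness test 'if not level_dict.get(current_level, None)' holds exactly when the
-- key is absent or its value is an empty dict: ported as 'size of getD-with-empty-default = 0'.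
def pvStepA (st : Int × PySem.Dict Int (PySem.Dict String (List Int)))
    (p : Int × Char) : Int × PySem.Dict Int (PySem.Dict String (List Int)) :=
    let lvl := st.1; let d := st.2; let idx := p.1; let ch := p.2
    if ch = '(' then (lvl + 1, d)
    else if ch = ')' then (lvl - 1, d)
    else if ch = '&' ∨ ch = '|' then
      let d1 := if (d.getD lvl PySem.Dict.empty).size = 0 then
          d.insert lvl (PySem.Dict.ofList [("&", ([] : List Int)), ("|", [])]) else d
      -- current_level_dict aliases level_dict[current_level]; the append is a modify in place
      (lvl, d1.modify lvl PySem.Dict.empty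
        (fun inner => inner.modify (if ch = '&' then "&" else "|") [] (fun l => l ++ [idx])))
    else (lvl, d)

def get_level_dict (condition : String) : List (Int × List (String × List Int)) :=
  let st := (PySem.List.enumerate condition.toList 0).foldl pvStepA (0, PySem.Dict.empty)
  st.2.items.map (fun p => (p.1, p.2.items))

-- ===== PORT B =====
-- phase 1: nesting level BEFORE each position (running balance table)
def pvLevels (bal : Int) : List Char → List Int
  | [] => []
  | c :: cs =>
      bal :: pvLevels (bal + ((if c = '(' then 1 else 0) - (if c = ')' then 1 else 0))) cs

-- phase 2 selector: keep operator positions, tagged (level, operator-key, index)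
def pvSel (q : (Int × Char) × Int) : Option (Int × String × Int) :=
  if q.1.2 = '&' ∨ q.1.2 = '|' then some (q.2, String.singleton q.1.2, q.1.1) else none

-- phase 3 body: level_dict.setdefault(lev, {'&': [], '|': []})[ch].append(idx)
def pvGroup (d : PySem.Dict Int (PySem.Dict String (List Int)))
    (t : Int × String × Int) : PySem.Dict Int (PySem.Dict String (List Int)) :=
  let lev := t.1; let ch := t.2.1; let idx := t.2.2
  (d.setdefault lev (PySem.Dict.ofList [("&", ([] : List Int)), ("|", [])])).modify
    lev PySem.Dict.empty (fun inner => inner.modify ch [] (fun l => l ++ [idx]))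

def get_level_dict_alt (condition : String) : List (Int × List (String × List Int)) :=
  let cs := condition.toList
  let ops := ((PySem.List.enumerate cs 0).zip (pvLevels 0 cs)).filterMap pvSel
  let d := ops.foldl pvGroup PySem.Dict.empty
  d.items.map (fun p => (p.1, p.2.items))

-- ===== PRECONDITION & SPEC =====
def Spec_get_level_dict (condition : String) (out : List (Int × List (String × List Int))) : Prop := out = get_level_dict_alt condition
instance (condition : String) (out : List (Int × List (String × List Int))) : Decidable (Spec_get_level_dict condition out) := by unfold Spec_get_level_dict; infer_instance

-- ===== CLAIM (what is proved, stated in full; the proofs are below) =====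
def Claim_equal_get_level_dict : Prop := ∀ (condition : String), Dom_get_level_dict condition → Spec_get_level_dict condition (get_level_dict condition)

-- ===== LEMMAS AND PROOFS =====

-- Invariant: every level present in the dict maps to a non-empty inner dict
def pvInv (d : PySem.Dict Int (PySem.Dict String (List Int))) : Prop :=
  ∀ k : Int, d.contains k = true → (d.getD k PySem.Dict.empty).size ≠ 0

lemma pv_size_insert_ne_zero {κ ν : Type} [BEq κ] (d : PySem.Dict κ ν) (k : κ) (v : ν) :
    (d.insert k v).size ≠ 0 := by
  simp only [PySem.Dict.insert, PySem.Dict.size]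
  split <;> intro h0
  · rename_i hc
    rw [List.length_map, List.length_eq_zero_iff] at h0
    simp [PySem.Dict.contains, h0] at hc
  · simp at h0

lemma pv_size_modify_ne_zero {κ ν : Type} [BEq κ] (d : PySem.Dict κ ν) (k : κ) (d0 : ν) (f : ν → ν) :
    (d.modify k d0 f).size ≠ 0 := by
  unfold PySem.Dict.modify; exact pv_size_insert_ne_zero _ _ _

lemma pv_setdefault_eq_insert {κ ν : Type} [BEq κ] (d : PySem.Dict κ ν) (k : κ) (v : ν)
    (hc : d.contains k = false) : d.setdefault k v = d.insert k v := by
  apply PySem.Dict.ext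
  rw [PySem.Dict.items_insert_of_not_contains d v hc]
  simp [PySem.Dict.setdefault, hc]

-- one operator step: A's get/truthiness/insert/append equals B's setdefault/append, under pvInv
lemma pv_step_eq (d : PySem.Dict Int (PySem.Dict String (List Int))) (lvl idx : Int)
    (ch : String) (h : pvInv d) :
    (if (d.getD lvl PySem.Dict.empty).size = 0 then
        d.insert lvl (PySem.Dict.ofList [("&", ([] : List Int)), ("|", [])]) else d).modify
      lvl PySem.Dict.empty (fun inner => inner.modify ch [] (fun l => l ++ [idx]))
    = pvGroup d (lvl, ch, idx) := by
  show _ = (d.setdefault lvl (PySem.Dict.ofList [("&", ([] : List Int)), ("|", [])])).modify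
      lvl PySem.Dict.empty (fun inner => inner.modify ch [] (fun l => l ++ [idx]))
  by_cases hc : d.contains lvl = true
  · have := h lvl hc
    simp [this, PySem.Dict.setdefault, hc]
  · have hc' : d.contains lvl = false := by simpa using hc
    have hg : d.getD lvl PySem.Dict.empty = PySem.Dict.empty :=
      PySem.Dict.getD_of_not_contains d _ hc'
    rw [pv_setdefault_eq_insert d lvl _ hc', hg]
    simp [PySem.Dict.empty, PySem.Dict.size]

-- the invariant is preserved by an operator step
lemma pv_inv_group (d : PySem.Dict Int (PySem.Dict String (List Int))) (lvl idx : Int)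
    (ch : String) (h : pvInv d) : pvInv (pvGroup d (lvl, ch, idx)) := by
  show pvInv ((d.setdefault lvl (PySem.Dict.ofList [("&", ([] : List Int)), ("|", [])])).modify
      lvl PySem.Dict.empty (fun inner => inner.modify ch [] (fun l => l ++ [idx])))
  intro k hcon
  by_cases hk : k = lvl
  · subst hk
    rw [PySem.Dict.getD_modify_self]
    exact pv_size_modify_ne_zero _ _ _ _
  · rw [PySem.Dict.getD_modify_of_ne _ _ _ hk]
    rw [PySem.Dict.contains_modify] at hcon
    by_cases hcl : d.contains lvl = true
    · have hd1 : d.setdefault lvl (PySem.Dict.ofList [("&", ([] : List Int)), ("|", [])]) = d := by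
        simp [PySem.Dict.setdefault, hcl]
      rw [hd1] at hcon ⊢
      apply h
      simpa [hk] using hcon
    · have hc' : d.contains lvl = false := by simpa using hcl
      rw [pv_setdefault_eq_insert d lvl _ hc'] at hcon ⊢
      rw [PySem.Dict.getD_insert_of_ne _ _ _ hk]
      rw [PySem.Dict.contains_insert] at hcon
      apply h
      simpa [hk] using hcon

-- main correspondence: A's fused fold = B's grouping fold over the selected operators
lemma pv_main (cs : List Char) (idx lvl : Int)
    (d : PySem.Dict Int (PySem.Dict String (List Int))) (h : pvInv d) :
    ((PySem.List.enumerate cs idx).foldl pvStepA (lvl, d)).2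
      = (((PySem.List.enumerate cs idx).zip (pvLevels lvl cs)).filterMap pvSel).foldl pvGroup d := by
  induction cs generalizing idx lvl d with
  | nil => simp [PySem.List.enumerate_nil, pvLevels]
  | cons c cs ih =>
    rw [PySem.List.enumerate_cons, List.foldl_cons]
    simp only [pvLevels, List.zip_cons_cons]
    by_cases h1 : c = '('
    · subst h1
      rw [List.filterMap_cons_none (by simp [pvSel])]
      rw [show pvStepA (lvl, d) (idx, '(') = (lvl + 1, d) from rfl]
      rw [show lvl + ((if ('(' : Char) = '(' then (1 : Int) else 0)
            - (if ('(' : Char) = ')' then 1 else 0)) = lvl + 1 by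
            rw [if_pos rfl, if_neg (by decide)]; ring]
      exact ih (idx + 1) (lvl + 1) d h
    · by_cases h2 : c = ')'
      · subst h2
        rw [List.filterMap_cons_none (by simp [pvSel])]
        rw [show pvStepA (lvl, d) (idx, ')') = (lvl - 1, d) from rfl]
        rw [show lvl + ((if (')' : Char) = '(' then (1 : Int) else 0)
              - (if (')' : Char) = ')' then 1 else 0)) = lvl - 1 by
              rw [if_neg (by decide), if_pos rfl]; ring]
        exact ih (idx + 1) (lvl - 1) d h
      · have hlev : lvl + ((if c = '(' then (1 : Int) else 0)
            - (if c = ')' then 1 else 0)) = lvl := by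
          rw [if_neg h1, if_neg h2]; ring
        by_cases h3 : c = '&' ∨ c = '|'
        · have hkey : pvSel ((idx, c), lvl) = some (lvl, String.singleton c, idx) := by
            simp [pvSel, h3]
          rw [List.filterMap_cons_some hkey, List.foldl_cons, hlev]
          have hA : pvStepA (lvl, d) (idx, c)
              = (lvl, pvGroup d (lvl, String.singleton c, idx)) := by
            rcases h3 with h3 | h3 <;> subst h3
            · exact congrArg (Prod.mk lvl) (pv_step_eq d lvl idx "&" h)
            · exact congrArg (Prod.mk lvl) (pv_step_eq d lvl idx "|" h)
          rw [hA]
          exact ih (idx + 1) lvl (pvGroup d (lvl, String.singleton c, idx))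
            (pv_inv_group d lvl idx _ h)
        · rw [List.filterMap_cons_none (by simp [pvSel, h3]), hlev]
          rw [show pvStepA (lvl, d) (idx, c) = (lvl, d) by
            push Not at h3; simp [pvStepA, h1, h2, h3.1, h3.2]]
          exact ih (idx + 1) lvl d h

-- ===== VERDICT (by name: the statement is the Claim_ definition above) =====
theorem get_level_dict_spec : Claim_equal_get_level_dict := by
  intro condition _
  unfold Spec_get_level_dict get_level_dict get_level_dict_alt
  have h := pv_main condition.toList 0 0 PySem.Dict.empty (by intro k hk; simp [PySem.Dict.contains_empty] at hk)
  simp only [h]
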